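-- pv_equiv track=rewrite | github.com/ydb-platform/ydb | contrib/python/tracerite/tracerite/syntaxerror.py | _find_unclosed_opener
-- ===== SOURCE A (Python) =====
-- BRACKET_PAIRS_REV = {"(": ")", "[": "]", "{": "}"}
--
-- def _iter_code_chars(source_lines, end_line=None, end_col=None):
--     """Iterate over characters in source code, skipping strings and comments.
--
--     Yields (line_idx_1based, col, char) for each character that is actual code
--     (not inside a string literal or comment).
--     """
--     if end_line is None:
--         end_line = len(source_lines)
--
--     in_string = None  # None, or the quote character(s) that opened the string
--
--     for line_idx in range(min(end_line, len(source_lines))):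
--         line = source_lines[line_idx].rstrip("\n\r")
--         line_num = line_idx + 1  # 1-based
--
--         # Determine where to stop on this line
--         line_end = len(line)
--         if line_num == end_line and end_col is not None:
--             line_end = min(line_end, end_col)
--
--         col = 0
--         while col < line_end:
--             char = line[col]
--             rest = line[col:]
--
--             if in_string:
--                 # Check for end of string
--                 if rest.startswith(in_string):
--                     # Check it's not escaped (count preceding backslashes)
--                     num_backslashes = 0
--                     check_col = col - 1
--                     while check_col >= 0 and line[check_col] == "\\":
--                         num_backslashes += 1
--                         check_col -= 1
--                     if num_backslashes % 2 == 0:  # Not escaped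
--                         col += len(in_string)
--                         in_string = None
--                         continue
--                 col += 1
--                 continue
--
--             # Check for start of string
--             if rest.startswith('"""') or rest.startswith("'''"):
--                 in_string = rest[:3]
--                 col += 3
--                 continue
--             if char in "\"'":
--                 in_string = char
--                 col += 1
--                 continue
--
--             # Check for comment
--             if char == "#":
--                 break  # Rest of line is comment
--
--             # This is actual code
--             yield line_num, col, char
--             col += 1
--
--         # Single-quoted strings don't span lines (would be a syntax error)
--         if in_string and len(in_string) == 1:
--             in_string = None
--
-- def _find_unclosed_opener(source_lines, error_line, opener_char):
--     """Find an unclosed opening bracket by scanning the source.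
--
--     Uses proper tokenization to skip brackets inside strings and comments.
--     """
--     closer_char = BRACKET_PAIRS_REV.get(opener_char, ")")
--
--     # Scan through code tracking bracket balance
--     stack = []  # Stack of (line, col) for opening brackets
--
--     for line_num, col, char in _iter_code_chars(source_lines, error_line):
--         if char == opener_char:
--             stack.append((line_num, col))
--         elif char == closer_char and stack:
--             stack.pop()
--
--     # Return the first unclosed opener
--     if stack:
--         return stack[0]
--     return None, None
-- ===== SOURCE B (Python) =====
-- BRACKET_PAIRS_REV = {"(": ")", "[": "]", "{": "}"}
--
-- def _bracket_events(source_lines, error_line, opener_char, closer_char):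
--     """Phase 1: collect (is_opener, line, col) for every bracket that is real
--     code (not inside a string literal or comment)."""
--     events = []
--     in_string = None
--     line_no = 0
--     for raw in source_lines[:max(error_line, 0)]:
--         line = raw.rstrip("\n\r")
--         line_no += 1
--         n = len(line)
--         col = 0
--         while col < n:
--             ch = line[col]
--             if in_string is not None:
--                 if line.startswith(in_string, col):
--                     backslashes = 0
--                     k = col - 1
--                     while k >= 0 and line[k] == "\\":
--                         backslashes += 1
--                         k -= 1
--                     if backslashes % 2 == 0:
--                         col += len(in_string)
--                         in_string = None
--                         continue
--                 col += 1
--                 continue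
--             if line.startswith('"""', col) or line.startswith("'''", col):
--                 in_string = line[col:col + 3]
--                 col += 3
--                 continue
--             if ch in "\"'":
--                 in_string = ch
--                 col += 1
--                 continue
--             if ch == "#":
--                 break
--             if ch == opener_char:
--                 events.append((True, line_no, col))
--             elif ch == closer_char:
--                 events.append((False, line_no, col))
--             col += 1
--         if in_string is not None and len(in_string) == 1:
--             in_string = None
--     return events
--
-- def _find_unclosed_opener(source_lines, error_line, opener_char):
--     """Two-phase algorithm: extract bracket events, then scan them BACKWARDS
--     keeping a surplus of not-yet-matched closers.  An opener met with zero
--     surplus is unmatched; the last such one seen (i.e. the first in forward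
--     order) is the answer.  Correct because bracket matching is symmetric:
--     an opener stays unmatched exactly when no later closer remains free for it."""
--     closer_char = BRACKET_PAIRS_REV.get(opener_char, ")")
--     events = _bracket_events(source_lines, error_line, opener_char, closer_char)
--     surplus = 0
--     result = (None, None)
--     for is_opener, line_no, col in reversed(events):
--         if not is_opener:
--             surplus += 1
--         elif surplus:
--             surplus -= 1
--         else:
--             result = (line_no, col)
--     return result
-- ===== Notes on version B (the rewrite author's own statement) =====
-- stated objective: alternative
-- what changed: Replaces A's forward position-stack simulation with a two-phase algorithm: phase 1 extracts only the bracket events, phase 2 finds the first unclosed opener by scanning the events BACKWARDS with a closer-surplus counter (an opener met with zero surplus is unmatched; the last such one in reverse order is the forward-first).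
import Mathlib
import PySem

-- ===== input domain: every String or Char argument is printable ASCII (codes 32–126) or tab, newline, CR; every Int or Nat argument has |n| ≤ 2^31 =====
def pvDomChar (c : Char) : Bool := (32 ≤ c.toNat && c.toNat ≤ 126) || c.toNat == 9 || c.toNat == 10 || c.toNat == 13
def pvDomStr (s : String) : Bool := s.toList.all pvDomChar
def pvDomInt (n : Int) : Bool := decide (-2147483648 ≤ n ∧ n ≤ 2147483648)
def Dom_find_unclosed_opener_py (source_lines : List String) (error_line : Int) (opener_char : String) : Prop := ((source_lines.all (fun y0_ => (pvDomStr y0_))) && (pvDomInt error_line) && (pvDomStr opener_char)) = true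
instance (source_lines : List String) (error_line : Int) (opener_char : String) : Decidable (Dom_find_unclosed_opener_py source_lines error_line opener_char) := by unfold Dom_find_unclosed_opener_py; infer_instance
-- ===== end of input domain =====

-- B replaces A's forward stack simulation by a two-phase algorithm: extract the
-- bracket events, then find the first unclosed opener by a BACKWARD scan with a
-- closer-surplus counter (objective: alternative algorithm, same cost).

-- ===== PORT A =====

-- s.rstrip("\n\r") ported by hand (PySem has no right-only strip with a chars argument):
-- drop trailing characters that are '\n' or '\r'; exact on all inputs.
def pvRstripNlCr (cs : List Char) : List Char :=
  (cs.reverse.dropWhile (fun c => c == '\n' || c == '\r')).reverse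

-- the inner `while check_col >= 0 and line[check_col] == "\\"` backslash counter of A
def pvA_countBS (line : List Char) : Nat → Nat
  | 0 => 0
  | c + 1 => if line.getD c ' ' == '\\' then pvA_countBS line c + 1 else 0

-- the `while col < line_end` loop of _iter_code_chars, producing the yielded triples
-- (line_num, col, char) of one line plus the final in_string state
def pvA_scanLine (line : List Char) (lineNum : Int) (col : Nat) (instr : Option (List Char)) :
    List (Int × Int × Char) × Option (List Char) :=
  if h : col < line.length then
    match instr with
    | some q =>
      if q.isPrefixOf (line.drop col) then
        if pvA_countBS line col % 2 == 0 then
          pvA_scanLine line lineNum (col + q.length) none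
        else
          pvA_scanLine line lineNum (col + 1) (some q)
      else
        pvA_scanLine line lineNum (col + 1) (some q)
    | none =>
      if ['"','"','"'].isPrefixOf (line.drop col) || ['\'','\'','\''].isPrefixOf (line.drop col) then
        pvA_scanLine line lineNum (col + 3) (some ((line.drop col).take 3))
      else if line.getD col ' ' == '"' || line.getD col ' ' == '\'' then
        pvA_scanLine line lineNum (col + 1) (some [line.getD col ' '])
      else if line.getD col ' ' == '#' then
        ([], none)
      else
        let r := pvA_scanLine line lineNum (col + 1) none
        ((lineNum, (col : Int), line.getD col ' ') :: r.1, r.2)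
  else ([], instr)
termination_by (line.length - col) * 2 + (if instr.isSome then 1 else 0)
decreasing_by all_goals simp_wf <;> omega

-- one iteration of `for line_idx in range(...)` in _iter_code_chars
def pvA_lineBody (source_lines : List String)
    (st : List (Int × Int × Char) × Option (List Char)) (line_idx : Nat) :
    List (Int × Int × Char) × Option (List Char) :=
  let line := pvRstripNlCr ((source_lines.getD line_idx "").toList)
  let r := pvA_scanLine line ((line_idx : Int) + 1) 0 st.2
  (st.1 ++ r.1,
    match r.2 with
    | some q => if q.length == 1 then none else some q
    | none => none)

-- one iteration of the bracket-balance loop of _find_unclosed_opener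
def pvA_stackStep (opL clL : List Char) (stack : List (Int × Int)) (t : Int × Int × Char) :
    List (Int × Int) :=
  if [t.2.2] == opL then stack ++ [(t.1, t.2.1)]
  else if [t.2.2] == clL && !stack.isEmpty then stack.dropLast
  else stack

def find_unclosed_opener_py (source_lines : List String) (error_line : Int) (opener_char : String) :
    Option Int × Option Int :=
  -- BRACKET_PAIRS_REV.get(opener_char, ")")
  let clL : List Char :=
    if opener_char == "(" then [')']
    else if opener_char == "[" then [']']
    else if opener_char == "{" then ['}']
    else [')']
  -- _iter_code_chars(source_lines, error_line): range(min(error_line, len(source_lines)))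
  let n : Nat := (min error_line (source_lines.length : Int)).toNat
  let iter := (List.range n).foldl (pvA_lineBody source_lines) ([], none)
  let stack := iter.1.foldl (pvA_stackStep opener_char.toList clL) []
  match stack with
  | [] => (none, none)
  | (l, c) :: _ => (some l, some c)

-- ===== PORT B =====

-- the backslash-parity counter of B (same inner while loop)
def pvB_backslashes (line : List Char) : Nat → Nat
  | 0 => 0
  | k + 1 => if line.getD k ' ' == '\\' then pvB_backslashes line k + 1 else 0

-- B's phase-1 per-line while loop: collects the bracket events (is_opener, line, col)
def pvB_scanLine (opL clL : List Char) (line : List Char) (lineNo : Int)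
    (col : Nat) (instr : Option (List Char)) :
    List (Bool × Int × Int) × Option (List Char) :=
  if h : col < line.length then
    match instr with
    | some q =>
      if q.isPrefixOf (line.drop col) then
        if pvB_backslashes line col % 2 == 0 then
          pvB_scanLine opL clL line lineNo (col + q.length) none
        else
          pvB_scanLine opL clL line lineNo (col + 1) (some q)
      else
        pvB_scanLine opL clL line lineNo (col + 1) (some q)
    | none =>
      if ['"','"','"'].isPrefixOf (line.drop col) || ['\'','\'','\''].isPrefixOf (line.drop col) then
        pvB_scanLine opL clL line lineNo (col + 3) (some ((line.drop col).take 3))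
      else if line.getD col ' ' == '"' || line.getD col ' ' == '\'' then
        pvB_scanLine opL clL line lineNo (col + 1) (some [line.getD col ' '])
      else if line.getD col ' ' == '#' then
        ([], none)
      else if [line.getD col ' '] == opL then
        ((true, lineNo, (col : Int)) :: (pvB_scanLine opL clL line lineNo (col + 1) none).1,
          (pvB_scanLine opL clL line lineNo (col + 1) none).2)
      else if [line.getD col ' '] == clL then
        ((false, lineNo, (col : Int)) :: (pvB_scanLine opL clL line lineNo (col + 1) none).1,
          (pvB_scanLine opL clL line lineNo (col + 1) none).2)
      else
        pvB_scanLine opL clL line lineNo (col + 1) none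
  else ([], instr)
termination_by (line.length - col) * 2 + (if instr.isSome then 1 else 0)
decreasing_by all_goals simp_wf <;> omega

-- B's phase-1 outer loop over the sliced line list, with the line counter
def pvB_lines (opL clL : List Char) (lines : List String) (lineNo : Int)
    (instr : Option (List Char)) : List (Bool × Int × Int) :=
  match lines with
  | [] => []
  | raw :: rest =>
    let line := pvRstripNlCr raw.toList
    let r := pvB_scanLine opL clL line (lineNo + 1) 0 instr
    let instr' : Option (List Char) :=
      match r.2 with
      | some q => if q.length == 1 then none else some q
      | none => none
    r.1 ++ pvB_lines opL clL rest (lineNo + 1) instr'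

-- B's phase-2 loop body: backward scan with a surplus of unmatched closers
def pvRstep (p : Nat × (Option Int × Option Int)) (e : Bool × Int × Int) :
    Nat × (Option Int × Option Int) :=
  if !e.1 then (p.1 + 1, p.2)
  else if p.1 != 0 then (p.1 - 1, p.2)
  else (p.1, (some e.2.1, some e.2.2))

def find_unclosed_opener_py_alt (source_lines : List String) (error_line : Int) (opener_char : String) :
    Option Int × Option Int :=
  let clL : List Char :=
    if opener_char == "(" then [')']
    else if opener_char == "[" then [']']
    else if opener_char == "{" then ['}']
    else [')']
  let events := pvB_lines opener_char.toList clL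
    (source_lines.take (max error_line 0).toNat) 0 none
  (events.reverse.foldl pvRstep (0, (none, none))).2

-- ===== PRECONDITION & SPEC =====
def Spec_find_unclosed_opener_py (source_lines : List String) (error_line : Int) (opener_char : String) (out : Option Int × Option Int) : Prop := out = find_unclosed_opener_py_alt source_lines error_line opener_char
instance (source_lines : List String) (error_line : Int) (opener_char : String) (out : Option Int × Option Int) : Decidable (Spec_find_unclosed_opener_py source_lines error_line opener_char out) := by unfold Spec_find_unclosed_opener_py; infer_instance

-- ===== CLAIM (what is proved, stated in full; the proofs are below) =====
def Claim_equal_find_unclosed_opener_py : Prop := ∀ (source_lines : List String) (error_line : Int) (opener_char : String), Dom_find_unclosed_opener_py source_lines error_line opener_char → Spec_find_unclosed_opener_py source_lines error_line opener_char (find_unclosed_opener_py source_lines error_line opener_char)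

-- ===== LEMMAS AND PROOFS =====

-- classify one of A's yielded code chars as a bracket event (or none)
def pvG (opL clL : List Char) (t : Int × Int × Char) : Option (Bool × Int × Int) :=
  if [t.2.2] == opL then some (true, t.1, t.2.1)
  else if [t.2.2] == clL then some (false, t.1, t.2.1)
  else none

-- the event-level forward stack step (A's step restricted to bracket events)
def pvEstep (st : List (Int × Int)) (e : Bool × Int × Int) : List (Int × Int) :=
  if e.1 then st ++ [(e.2.1, e.2.2)] else st.dropLast

def pvEncode : Option (Int × Int) → Option Int × Option Int
  | none => (none, none)
  | some (l, c) => (some l, some c)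

def pvR (evs : List (Bool × Int × Int)) : Nat × (Option Int × Option Int) :=
  List.foldr (fun e p => pvRstep p e) (0, (none, none)) evs

theorem pvB_backslashes_eq (line : List Char) (c : Nat) :
    pvB_backslashes line c = pvA_countBS line c := by
  induction c with
  | zero => rfl
  | succ c ih => simp [pvB_backslashes, pvA_countBS, ih]

theorem pvB_scanLine_eq (opL clL line : List Char) (lineNo : Int) (col : Nat)
    (instr : Option (List Char)) :
    pvB_scanLine opL clL line lineNo col instr =
      ((pvA_scanLine line lineNo col instr).1.filterMap (pvG opL clL),
        (pvA_scanLine line lineNo col instr).2) := by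
  fun_induction pvB_scanLine opL clL line lineNo col instr with
  | case1 col q h hpre hbs ih => rw [pvA_scanLine]; simp_all [pvB_backslashes_eq]
  | case2 col q h hpre hbs ih => rw [pvA_scanLine]; simp_all [pvB_backslashes_eq]
  | case3 col q h hpre ih => rw [pvA_scanLine]; simp_all
  | case4 col h htriple ih => rw [pvA_scanLine]; simp_all
  | case5 col h htriple hq ih => rw [pvA_scanLine]; simp_all
  | case6 col h htriple hq hhash => rw [pvA_scanLine]; simp_all
  | case7 col h htriple hq hhash hop ih =>
    rw [pvA_scanLine]; simp_all [pvG]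
  | case8 col h htriple hq hhash hop hcl ih =>
    rw [pvA_scanLine]; simp_all [pvG]
  | case9 col h htriple hq hhash hop hcl ih =>
    rw [pvA_scanLine]; simp_all [pvG]
  | case10 h =>
    rw [pvA_scanLine.eq_def]; split <;> simp_all

theorem pvA_fold_acc (source_lines : List String) (idxs : List Nat)
    (acc : List (Int × Int × Char)) (instr : Option (List Char)) :
    List.foldl (pvA_lineBody source_lines) (acc, instr) idxs =
      (acc ++ (List.foldl (pvA_lineBody source_lines) ([], instr) idxs).1,
        (List.foldl (pvA_lineBody source_lines) ([], instr) idxs).2) := by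
  induction idxs generalizing acc instr with
  | nil => simp
  | cons i idxs ih =>
    simp only [List.foldl_cons, pvA_lineBody, List.nil_append]
    rw [ih]
    conv_rhs => rw [ih]
    simp [List.append_assoc]

theorem pvB_lines_eq (opL clL : List Char) (sls : List String) (m k : Nat)
    (instr : Option (List Char)) (hmk : k + m ≤ sls.length) :
    pvB_lines opL clL ((sls.drop k).take m) (k : Int) instr =
      ((List.foldl (pvA_lineBody sls) ([], instr) (List.range' k m)).1).filterMap
        (pvG opL clL) := by
  induction m generalizing k instr with
  | zero => simp [pvB_lines]
  | succ m ih =>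
    have hk : k < sls.length := by omega
    rw [List.drop_eq_getElem_cons hk]
    rw [List.range'_succ]
    simp only [List.take_succ_cons, pvB_lines, List.foldl_cons]
    rw [pvB_scanLine_eq]
    simp only [pvA_lineBody, List.nil_append]
    rw [pvA_fold_acc]
    rw [List.filterMap_append]
    have hg : sls.getD k "" = sls[k] := by
      simp [List.getD, List.getElem?_eq_getElem hk]
    rw [hg]
    have hcast : (k : Int) + 1 = ((k + 1 : Nat) : Int) := by push_cast; ring
    rw [hcast]
    rw [ih (k + 1) _ (by omega)]

theorem pvStack_filterMap (opL clL : List Char) (l : List (Int × Int × Char)) :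
    ∀ st : List (Int × Int),
      List.foldl (pvA_stackStep opL clL) st l =
        List.foldl pvEstep st (l.filterMap (pvG opL clL)) := by
  induction l with
  | nil => intro st; rfl
  | cons t l ih =>
    intro st
    simp only [List.foldl_cons, List.filterMap_cons]
    by_cases hop : [t.2.2] = opL
    · simp [pvG, hop, pvA_stackStep, pvEstep, ih]
    · by_cases hcl : [t.2.2] = clL
      · have hne : clL ≠ opL := fun hh => hop (hcl.trans hh)
        have : pvA_stackStep opL clL st t = st.dropLast := by
          cases st <;> simp [pvA_stackStep, hop, hcl, hne]
        simp [pvG, hcl, hne, pvEstep, this, ih, List.foldl_cons]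
      · simp [pvG, hop, hcl, pvA_stackStep, ih]

-- the reverse-scan / forward-stack duality: the surplus counts the closers the
-- forward run would pop from an ambient stack, and the candidate is the bottom
-- of the stack grown from empty
theorem pvRev (evs : List (Bool × Int × Int)) :
    (∀ st : List (Int × Int),
      List.foldl pvEstep st evs =
        st.take (st.length - (pvR evs).1) ++ List.foldl pvEstep [] evs) ∧
    (pvR evs).2 = pvEncode (List.foldl pvEstep [] evs).head? := by
  induction evs with
  | nil => exact ⟨fun st => by simp [pvR], rfl⟩
  | cons e evs ih =>
    obtain ⟨ihS, ihC⟩ := ih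
    obtain ⟨iso, l, c⟩ := e
    cases iso with
    | false =>
      have ef : ∀ st : List (Int × Int), pvEstep st (false, l, c) = st.dropLast :=
        fun _ => rfl
      have rf : pvR ((false, l, c) :: evs) = ((pvR evs).1 + 1, (pvR evs).2) := rfl
      constructor
      · intro st
        rw [List.foldl_cons, List.foldl_cons, ef, ef, ihS st.dropLast, rf]
        have htake : st.dropLast.take (st.dropLast.length - (pvR evs).1)
            = st.take (st.length - ((pvR evs).1 + 1)) := by
          rw [List.length_dropLast, List.dropLast_eq_take, List.take_take]
          congr 1
          omega
        rw [htake]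
        simp
      · rw [rf]
        simpa [List.foldl_cons, ef] using ihC
    | true =>
      have et : ∀ st : List (Int × Int), pvEstep st (true, l, c) = st ++ [(l, c)] :=
        fun _ => rfl
      have rt : pvR ((true, l, c) :: evs)
          = if (pvR evs).1 != 0 then ((pvR evs).1 - 1, (pvR evs).2)
            else ((pvR evs).1, (some l, some c)) := rfl
      by_cases hc : (pvR evs).1 = 0
      · have hE' : List.foldl pvEstep [] ((true, l, c) :: evs)
            = (l, c) :: List.foldl pvEstep [] evs := by
          rw [List.foldl_cons, et, List.nil_append, ihS [(l, c)]]
          simp [hc]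
        constructor
        · intro st
          rw [List.foldl_cons, et, ihS (st ++ [(l, c)]), hE', rt]
          simp only [hc, Nat.sub_zero, bne_self_eq_false, Bool.false_eq_true, if_neg,
            List.length_append, List.length_cons, List.length_nil]
          rw [List.take_of_length_le (by simp)]
          simp
        · rw [rt, hE']
          simp [hc, pvEncode]
      · have hE' : List.foldl pvEstep [] ((true, l, c) :: evs)
            = List.foldl pvEstep [] evs := by
          rw [List.foldl_cons, et, List.nil_append, ihS [(l, c)]]
          have h10 : 1 - (pvR evs).1 = 0 := by omega
          simp [h10]
        constructor
        · intro st
          rw [List.foldl_cons, et, ihS (st ++ [(l, c)]), hE', rt]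
          rw [if_pos (by simpa using hc)]
          simp only [List.length_append, List.length_cons, List.length_nil]
          rw [List.take_append_of_le_length (by omega)]
          congr 2
          omega
        · rw [rt, hE']
          rw [if_pos (by simpa using hc)]
          exact ihC

-- ===== VERDICT (by name: the statement is the Claim_ definition above) =====
theorem find_unclosed_opener_py_spec : Claim_equal_find_unclosed_opener_py := by
  intro source_lines error_line opener_char _
  unfold Spec_find_unclosed_opener_py
  unfold find_unclosed_opener_py find_unclosed_opener_py_alt
  dsimp only
  simp only [beq_iff_eq]
  have hlist : source_lines.take (max error_line 0).toNat
      = source_lines.take (min error_line (source_lines.length : Int)).toNat := by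
    rw [List.take_eq_take_iff]
    omega
  rw [hlist]
  have hB := pvB_lines_eq opener_char.toList
    (if opener_char = "(" then [')'] else if opener_char = "[" then [']']
     else if opener_char = "{" then ['}'] else [')'])
    source_lines (min error_line (source_lines.length : Int)).toNat 0 none (by omega)
  rw [List.drop_zero, Nat.cast_zero] at hB
  rw [hB]
  rw [List.range_eq_range']
  rw [pvStack_filterMap]
  rw [List.foldl_reverse]
  have hmain := (pvRev ((List.foldl (pvA_lineBody source_lines) ([], none)
      (List.range' 0 (min error_line (source_lines.length : Int)).toNat)).1.filterMap
      (pvG opener_char.toList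
        (if opener_char = "(" then [')'] else if opener_char = "[" then [']']
         else if opener_char = "{" then ['}'] else [')'])))).2
  unfold pvR at hmain
  rw [hmain]
  cases hstack : List.foldl pvEstep []
      ((List.foldl (pvA_lineBody source_lines) ([], none)
        (List.range' 0 (min error_line (source_lines.length : Int)).toNat)).1.filterMap
        (pvG opener_char.toList
          (if opener_char = "(" then [')'] else if opener_char = "[" then [']']
           else if opener_char = "{" then ['}'] else [')']))) with
  | nil => simp [pvEncode]
  | cons x tl => obtain ⟨xl, xc⟩ := x; simp [pvEncode]
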